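-- pv_equiv track=rewrite | github.com/arc53/DocsGPT | application/core/model_yaml.py | _expand_attachments
-- ===== SOURCE A (Python) =====
-- from typing import Dict, List, Optional, Sequence
--
-- class ModelYAMLError(ValueError):
--     """Raised when a model YAML fails parsing, schema, or alias validation."""
--
-- def _expand_attachments(
--     attachments: Sequence[str], aliases: Dict[str, List[str]], source: str
-- ) -> List[str]:
--     """Resolve attachment shorthands (``image``, ``pdf``) to MIME types.
--
--     Raw MIME-typed entries (containing ``/``) pass through unchanged.
--     Unknown aliases raise ``ModelYAMLError``.
--     """
--     expanded: List[str] = []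
--     seen: set = set()
--     for entry in attachments:
--         if "/" in entry:
--             if entry not in seen:
--                 expanded.append(entry)
--                 seen.add(entry)
--             continue
--         if entry not in aliases:
--             valid = ", ".join(sorted(aliases.keys())) or "<none defined>"
--             raise ModelYAMLError(
--                 f"{source}: unknown attachment alias '{entry}'. "
--                 f"Valid aliases: {valid}. "
--                 "(Or use a raw MIME type like 'image/png'.)"
--             )
--         for mime in aliases[entry]:
--             if mime not in seen:
--                 expanded.append(mime)
--                 seen.add(mime)
--     return expanded
-- ===== SOURCE B (Python) =====
-- from typing import Dict, List, Sequence
--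
--
-- class ModelYAMLError(ValueError):
--     """Raised when a model YAML fails parsing, schema, or alias validation."""
--
--
-- def _expand_attachments(
--     attachments: Sequence[str], aliases: Dict[str, List[str]], source: str
-- ) -> List[str]:
--     """Three staged passes: validate aliases, flatten to MIME strings, positional dedup."""
--     # Pass 1: validation -- reject the first entry that is neither raw MIME nor a known alias.
--     bad = next((e for e in attachments if "/" not in e and e not in aliases), None)
--     if bad is not None:
--         valid = ", ".join(sorted(aliases.keys())) or "<none defined>"
--         raise ModelYAMLError(
--             f"{source}: unknown attachment alias '{bad}'. "
--             f"Valid aliases: {valid}. "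
--             "(Or use a raw MIME type like 'image/png'.)"
--         )
--     # Pass 2: flatten every entry to its MIME strings.
--     flat = [m for e in attachments for m in ([e] if "/" in e else aliases[e])]
--     # Pass 3: keep each element only at its first position (prefix scan, no auxiliary set).
--     return [x for i, x in enumerate(flat) if x not in flat[:i]]
-- ===== Notes on version B (the rewrite author's own statement) =====
-- stated objective: alternative
-- what changed: Replaces A's single interleaved loop with an explicit seen-set by three staged passes: an up-front validation pass that raises on the first unknown alias, a flattening comprehension producing the raw MIME stream, and a positional dedup that keeps an element iff it does not occur in the prefix before it (no set, no dict); trades the O(n) seen-set dedup for a quadratic prefix scan.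
-- outside the precondition, e.g. on _expand_attachments(['bogus'], {}, 'src'): A raises ModelYAMLError, B raises ModelYAMLError
import Mathlib
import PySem

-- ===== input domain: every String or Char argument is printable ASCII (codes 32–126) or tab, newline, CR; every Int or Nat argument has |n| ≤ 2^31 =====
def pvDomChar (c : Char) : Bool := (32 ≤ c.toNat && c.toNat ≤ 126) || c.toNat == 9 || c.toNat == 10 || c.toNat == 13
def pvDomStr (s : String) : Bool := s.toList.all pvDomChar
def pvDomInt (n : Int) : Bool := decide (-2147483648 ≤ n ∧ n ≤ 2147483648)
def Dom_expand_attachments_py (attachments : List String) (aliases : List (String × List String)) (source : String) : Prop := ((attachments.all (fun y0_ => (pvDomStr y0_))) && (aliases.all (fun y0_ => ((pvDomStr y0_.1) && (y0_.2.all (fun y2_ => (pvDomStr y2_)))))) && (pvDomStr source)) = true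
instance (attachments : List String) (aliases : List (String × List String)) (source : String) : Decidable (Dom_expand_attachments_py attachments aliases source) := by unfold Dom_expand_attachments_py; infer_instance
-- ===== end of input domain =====

-- ===== PORT A =====
-- A: one loop over attachments with an explicit seen-set, appending unseen MIME strings.
def expand_attachments_py (attachments : List String) (aliases : List (String × List String)) (source : String) : List String :=
  (attachments.foldl (fun (st : List String × PySem.Set String) entry =>
      if PySem.Str.isIn "/" entry then
        if PySem.Set.contains st.2 entry then st
        else (st.1 ++ [entry], PySem.Set.add st.2 entry)
      else
        match (PySem.Dict.mk aliases).get? entry with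
        | none => st      -- Python raises ModelYAMLError here; excluded by Pre_
        | some mimes =>
          mimes.foldl (fun (st : List String × PySem.Set String) mime =>
            if PySem.Set.contains st.2 mime then st
            else (st.1 ++ [mime], PySem.Set.add st.2 mime)) st)
    ([], PySem.Set.empty)).1

-- ===== PORT B =====
-- B: validate (raise on first unknown alias — excluded by Pre_, value-irrelevant inside it),
-- flatten each entry to its MIME strings, then positional dedup: keep flat[i] iff it is not
-- in the prefix flat[:i]. Objective: alternative staged decomposition, no seen-set.
def expand_attachments_py_alt (attachments : List String) (aliases : List (String × List String)) (source : String) : List String :=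
  let flat := attachments.flatMap (fun e =>
    if PySem.Str.isIn "/" e then [e]
    else (((PySem.Dict.mk aliases).get? e).getD []))
  ((PySem.List.enumerate flat 0).filter
      (fun p => !(decide (p.2 ∈ PySem.List.slice flat none (some p.1))))).map (·.2)

-- ===== PRECONDITION & SPEC =====
-- Pre_ excludes exactly the inputs where A (and B) raise ModelYAMLError: some entry
-- neither contains "/" nor is a key of aliases.
def Pre_expand_attachments_py (attachments : List String) (aliases : List (String × List String)) (source : String) : Prop :=
  ∀ entry ∈ attachments, PySem.Str.isIn "/" entry = true ∨ (PySem.Dict.mk aliases).contains entry = true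
instance (attachments : List String) (aliases : List (String × List String)) (source : String) : Decidable (Pre_expand_attachments_py attachments aliases source) := by unfold Pre_expand_attachments_py; infer_instance
def pvWitness_expand_attachments_py : List String × (List (String × List String)) × String :=
  (["image", "image/png", "pdf", "image"],
   [("image", ["image/png", "image/jpeg"]), ("pdf", ["application/pdf"])],
   "models.yaml")

def Spec_expand_attachments_py (attachments : List String) (aliases : List (String × List String)) (source : String) (out : List String) : Prop := out = expand_attachments_py_alt attachments aliases source
instance (attachments : List String) (aliases : List (String × List String)) (source : String) (out : List String) : Decidable (Spec_expand_attachments_py attachments aliases source out) := by unfold Spec_expand_attachments_py; infer_instance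

-- ===== CLAIM (what is proved, stated in full; the proofs are below) =====
def Claim_equal_expand_attachments_py : Prop := ∀ (attachments : List String) (aliases : List (String × List String)) (source : String), Dom_expand_attachments_py attachments aliases source → Pre_expand_attachments_py attachments aliases source → Spec_expand_attachments_py attachments aliases source (expand_attachments_py attachments aliases source)

-- ===== LEMMAS AND PROOFS =====

-- first-occurrence selection relative to an already-seen prefix (proof-side abstraction)
def pvSel (acc : List String) : List String → List String
  | [] => []
  | x :: xs => if x ∈ acc then pvSel (acc ++ [x]) xs else x :: pvSel (acc ++ [x]) xs

theorem pvSel_cons (acc : List String) (x : String) (xs : List String) :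
    pvSel acc (x :: xs) = if x ∈ acc then pvSel (acc ++ [x]) xs else x :: pvSel (acc ++ [x]) xs := rfl

theorem pvSel_congr (a b : List String) (xs : List String)
    (h : ∀ y, y ∈ a ↔ y ∈ b) : pvSel a xs = pvSel b xs := by
  induction xs generalizing a b with
  | nil => rfl
  | cons x xs ih =>
    have hx : (x ∈ a) ↔ (x ∈ b) := h x
    have h' : ∀ y, y ∈ a ++ [x] ↔ y ∈ b ++ [x] := by
      intro y; simp [List.mem_append, h y]
    rw [pvSel_cons, pvSel_cons]
    by_cases hm : x ∈ a
    · simp [hm, hx.mp hm, ih _ _ h']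
    · have hb : x ∉ b := fun hb => hm (hx.mpr hb)
      simp [hm, hb, ih _ _ h']

-- A's fold with Set.add appends exactly the first-occurrence selection.
theorem pvFoldl_add_eq_sel (xs acc : List String) :
    xs.foldl PySem.Set.add acc = acc ++ pvSel acc xs := by
  induction xs generalizing acc with
  | nil => simp [pvSel]
  | cons x xs ih =>
    simp only [List.foldl_cons]
    by_cases hm : x ∈ acc
    · have ha : PySem.Set.add acc x = acc := by
        unfold PySem.Set.add PySem.Set.contains
        simp [hm]
      rw [ha, ih acc, pvSel_cons, if_pos hm,
        pvSel_congr (acc ++ [x]) acc xs (by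
          intro y
          simp only [List.mem_append, List.mem_singleton]
          constructor
          · rintro (h | rfl)
            · exact h
            · exact hm
          · exact Or.inl)]
    · have ha : PySem.Set.add acc x = acc ++ [x] := by
        unfold PySem.Set.add PySem.Set.contains
        simp [hm]
      rw [ha, ih (acc ++ [x]), pvSel_cons, if_neg hm, List.append_assoc]
      rfl

-- B's enumerate/prefix-slice filter computes the same first-occurrence selection.
theorem pvEnum_filter_eq_sel (pre xs : List String) :
    ((PySem.List.enumerate xs (pre.length : Int)).filter
        (fun p => !(decide (p.2 ∈ PySem.List.slice (pre ++ xs) none (some p.1))))).map (·.2)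
      = pvSel pre xs := by
  induction xs generalizing pre with
  | nil => simp [PySem.List.enumerate_nil, pvSel]
  | cons x xs ih =>
    rw [PySem.List.enumerate_cons]
    have hslice : PySem.List.slice (pre ++ x :: xs) none (some ((pre.length : Nat) : Int))
        = (pre ++ x :: xs).take pre.length := PySem.List.slice_to_natCast _ _
    have htake : (pre ++ x :: xs).take pre.length = pre := by
      simp
    have hassoc : pre ++ x :: xs = (pre ++ [x]) ++ xs := by simp
    have hlen : (pre.length : Int) + 1 = ((pre ++ [x]).length : Int) := by
      simp
    have ihx := ih (pre ++ [x])
    rw [← hassoc, ← hlen] at ihx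
    by_cases hm : x ∈ pre
    · rw [List.filter_cons_of_neg (by simp [hslice, htake, hm])]
      rw [ihx, pvSel_cons, if_pos hm]
    · rw [List.filter_cons_of_pos (by simp [hslice, htake, hm])]
      rw [List.map_cons, ihx, pvSel_cons, if_neg hm]

-- A's duplicated append/add step on a state whose two components coincide is Set.add on both.
theorem pvStep_pair (l : List String) (x : String) :
    (if PySem.Set.contains l x then ((l, l) : List String × PySem.Set String)
     else (l ++ [x], PySem.Set.add l x)) = (PySem.Set.add l x, PySem.Set.add l x) := by
  unfold PySem.Set.add
  split_ifs <;> rfl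

-- A's inner loop over a list of MIME strings, started on a doubled state, is foldl Set.add on both sides.
theorem pvInner_pair (mimes : List String) (l : List String) :
    mimes.foldl (fun (st : List String × PySem.Set String) mime =>
        if PySem.Set.contains st.2 mime then st
        else (st.1 ++ [mime], PySem.Set.add st.2 mime)) (l, l)
      = (mimes.foldl PySem.Set.add l, mimes.foldl PySem.Set.add l) := by
  induction mimes generalizing l with
  | nil => rfl
  | cons m ms ih =>
    simp only [List.foldl_cons]
    rw [pvStep_pair]
    exact ih _

-- A's outer loop, started on a doubled state, computes foldl Set.add over the flattened stream on both sides.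
theorem pvOuter_pair (attachments : List String) (aliases : List (String × List String)) (l : List String) :
    attachments.foldl (fun (st : List String × PySem.Set String) entry =>
        if PySem.Str.isIn "/" entry then
          if PySem.Set.contains st.2 entry then st
          else (st.1 ++ [entry], PySem.Set.add st.2 entry)
        else
          match (PySem.Dict.mk aliases).get? entry with
          | none => st
          | some mimes =>
            mimes.foldl (fun (st : List String × PySem.Set String) mime =>
              if PySem.Set.contains st.2 mime then st
              else (st.1 ++ [mime], PySem.Set.add st.2 mime)) st) (l, l)
      = (((attachments.flatMap (fun entry =>
            if PySem.Str.isIn "/" entry then [entry]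
            else (((PySem.Dict.mk aliases).get? entry).getD []))).foldl PySem.Set.add l),
         ((attachments.flatMap (fun entry =>
            if PySem.Str.isIn "/" entry then [entry]
            else (((PySem.Dict.mk aliases).get? entry).getD []))).foldl PySem.Set.add l)) := by
  induction attachments generalizing l with
  | nil => rfl
  | cons e es ih =>
    simp only [List.foldl_cons, List.flatMap_cons, List.foldl_append]
    by_cases h : PySem.Str.isIn "/" e = true
    · simp only [h, if_true]
      rw [pvStep_pair]
      simpa only [List.foldl_cons, List.foldl_nil] using ih (PySem.Set.add l e)
    · simp only [h, if_false, Bool.false_eq_true]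
      cases hg : (PySem.Dict.mk aliases).get? e with
      | none =>
        simpa only [hg, Option.getD_none, List.foldl_nil] using ih l
      | some mimes =>
        simp only [Option.getD_some]
        rw [pvInner_pair]
        exact ih _

-- ===== VERDICT (by name: the statement is the Claim_ definition above) =====
theorem expand_attachments_py_spec : Claim_equal_expand_attachments_py := by
  intro attachments aliases source _ _
  unfold Spec_expand_attachments_py
  simp only [expand_attachments_py, expand_attachments_py_alt, PySem.Set.empty]
  rw [pvOuter_pair attachments aliases []]
  rw [pvFoldl_add_eq_sel _ []]
  have hb := pvEnum_filter_eq_sel [] (attachments.flatMap (fun e =>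
    if PySem.Str.isIn "/" e then [e]
    else (((PySem.Dict.mk aliases).get? e).getD [])))
  simp only [List.nil_append, List.length_nil, Nat.cast_zero] at hb
  simpa using hb.symm
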